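-- pv_equiv track=rewrite | github.com/claytonstrawn/election_updates | santa_cruz_results_analyzer.py | election_results
-- ===== SOURCE A (Python) =====
-- def election_results(lines,election_name,election_ids):
--     i = election_ids[election_name]+1
--     string = lines[i]
--     ignore_text = ['Party', 'Total', 'REP', 'DEM',
--                    'Total', 'Write In Candidate', 'Write In', 'Total']
--     name = None
--     names = []
--     results = []
--     while string != 'Candidate':
--         if string not in ignore_text:
--             if name == None:
--                 name = string
--             else:
--                 votes = int(string.split(' ')[0])
--                 names.append(name)
--                 results.append(votes)
--                 name = None
--         i+=1
--         string = lines[i]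
--     return names,results
-- ===== SOURCE B (Python) =====
-- def election_results(lines, election_name, election_ids):
--     ignore = {'Party', 'Total', 'REP', 'DEM', 'Write In Candidate', 'Write In'}
--     i = election_ids[election_name] + 1
--     buffer = []
--     while lines[i] != 'Candidate':
--         if lines[i] not in ignore:
--             buffer.append(lines[i])
--         i += 1
--     it = iter(buffer)
--     pairs = list(zip(it, it))
--     names = [name for name, _ in pairs]
--     results = [int(count.split(' ')[0]) for _, count in pairs]
--     return names, results
-- ===== Notes on version B (the rewrite author's own statement) =====
-- stated objective: simpler
-- what changed: A's single scan with a name=None toggle state machine is replaced by a two-phase decomposition: one scan collects the non-ignored strings before the 'Candidate' sentinel into a flat buffer, then the buffer is paired positionally with zip(it, it) and the vote strings parsed in a comprehension.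
-- outside the precondition, e.g. on election_results(['Candidate'], 'e', {'e': -2}): A returns ([], []), B returns ([], [])
import Mathlib
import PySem

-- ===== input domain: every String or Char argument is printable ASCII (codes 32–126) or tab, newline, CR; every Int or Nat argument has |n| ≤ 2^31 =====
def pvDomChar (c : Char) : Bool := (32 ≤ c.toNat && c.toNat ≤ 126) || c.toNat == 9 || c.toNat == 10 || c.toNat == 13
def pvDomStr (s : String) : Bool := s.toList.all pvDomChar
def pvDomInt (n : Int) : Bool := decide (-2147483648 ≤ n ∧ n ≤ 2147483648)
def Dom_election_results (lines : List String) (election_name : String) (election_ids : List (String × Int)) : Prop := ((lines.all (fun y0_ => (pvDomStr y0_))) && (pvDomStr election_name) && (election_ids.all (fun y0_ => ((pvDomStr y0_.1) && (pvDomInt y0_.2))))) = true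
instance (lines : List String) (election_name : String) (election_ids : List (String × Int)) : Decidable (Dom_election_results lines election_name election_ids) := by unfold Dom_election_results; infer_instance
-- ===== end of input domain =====

-- B replaces A's one-pass toggle (name=None state machine) by a simpler two-phase decomposition:
-- collect the non-ignored strings before the 'Candidate' sentinel into a flat buffer, then pair them
-- positionally (zip of the buffer with itself); same return value wherever A returns (inside Pre_).

-- ===== PORT A =====
-- int(string.split(' ')[0]) — shared sub-expression of both Pythons
def pvParse? (s : String) : Option Int :=
  PySem.Int.ofStr? (((PySem.Str.split? s " ").getD []).headD "")

def pvIgnoreA : List String :=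
  ["Party", "Total", "REP", "DEM", "Total", "Write In Candidate", "Write In", "Total"]

-- A's while loop; fuel makes it total (2*len+2 always suffices: the index only increases and
-- pyGet? is none once it passes the end).  On Python's IndexError/ValueError the loop returns
-- the accumulators so far — those inputs are outside Pre_.
def pvLoopA (lines : List String) : Nat → Int → Option String → List String → List Int → List String × List Int
  | 0, _, _, names, results => (names, results)
  | fuel + 1, i, name, names, results =>
    match PySem.List.pyGet? lines i with
    | none => (names, results)   -- IndexError: excluded by Pre_
    | some string =>
      if string = "Candidate" then (names, results)
      else if string ∈ pvIgnoreA then pvLoopA lines fuel (i + 1) name names results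
      else
        match name with
        | none => pvLoopA lines fuel (i + 1) (some string) names results
        | some n =>
          match pvParse? string with
          | none => (names, results)   -- ValueError: excluded by Pre_
          | some v => pvLoopA lines fuel (i + 1) none (names ++ [n]) (results ++ [v])

def election_results (lines : List String) (election_name : String) (election_ids : List (String × Int)) : List String × List Int :=
  match PySem.Dict.get? (PySem.Dict.ofList election_ids) election_name with
  | none => ([], [])   -- KeyError: excluded by Pre_
  | some id => pvLoopA lines (2 * lines.length + 2) (id + 1) none [] []

-- ===== PORT B =====
def pvIgnoreB : PySem.Set String :=
  PySem.Set.ofList ["Party", "Total", "REP", "DEM", "Write In Candidate", "Write In"]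

-- B's first loop: flat buffer of the non-ignored strings before the sentinel
def pvCollectB (lines : List String) : Nat → Int → List String → List String
  | 0, _, buf => buf
  | fuel + 1, i, buf =>
    match PySem.List.pyGet? lines i with
    | none => buf   -- IndexError: excluded by Pre_
    | some s =>
      if s = "Candidate" then buf
      else pvCollectB lines fuel (i + 1) (if s ∈ pvIgnoreB then buf else buf ++ [s])

-- list(zip(it, it)) on iter(buffer): adjacent disjoint pairs, odd trailing element dropped
def pvPairs : List String → List (String × String)
  | a :: b :: rest => (a, b) :: pvPairs rest
  | _ => []

def election_results_alt (lines : List String) (election_name : String) (election_ids : List (String × Int)) : List String × List Int :=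
  match PySem.Dict.get? (PySem.Dict.ofList election_ids) election_name with
  | none => ([], [])   -- KeyError: excluded by Pre_
  | some id =>
    let pairs := pvPairs (pvCollectB lines (2 * lines.length + 2) (id + 1) [])
    (pairs.map (fun p => p.1), pairs.map (fun p => (pvParse? p.2).getD 0))

-- ===== PRECONDITION & SPEC =====
-- Pre_ excludes: a missing election_name key (KeyError), a scan that runs past the end without
-- meeting the 'Candidate' sentinel (IndexError), a vote string whose first token is not an int
-- (ValueError), and a negative scan start (election id < -1), where Python's negative-index
-- wraparound makes both programs scan from the end of the list (they agree there too, but the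
-- corner is an accident of indexing and is excluded from the claim).
def Pre_election_results (lines : List String) (election_name : String) (election_ids : List (String × Int)) : Prop :=
  (match PySem.Dict.get? (PySem.Dict.ofList election_ids) election_name with
   | none => false
   | some id =>
     decide (0 ≤ id + 1) &&
     decide ("Candidate" ∈ lines.drop (id + 1).toNat) &&
     ((((lines.drop (id + 1).toNat).takeWhile (fun s => s ≠ "Candidate")).filter
        (fun s => decide (s ∉ pvIgnoreB))).zipIdx.all
        (fun p => decide (p.2 % 2 = 0) || (pvParse? p.1).isSome))) = true
instance (lines : List String) (election_name : String) (election_ids : List (String × Int)) : Decidable (Pre_election_results lines election_name election_ids) := by unfold Pre_election_results; infer_instance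

def pvWitness_election_results : List String × String × (List (String × Int)) :=
  (["Senator", "Party", "Alice B", "12 34.5%", "Total", "Bob C", "7", "Candidate"], "e", [("e", 0)])

def Spec_election_results (lines : List String) (election_name : String) (election_ids : List (String × Int)) (out : List String × List Int) : Prop := out = election_results_alt lines election_name election_ids
instance (lines : List String) (election_name : String) (election_ids : List (String × Int)) (out : List String × List Int) : Decidable (Spec_election_results lines election_name election_ids out) := by unfold Spec_election_results; infer_instance

-- ===== CLAIM (what is proved, stated in full; the proofs are below) =====
def Claim_equal_election_results : Prop := ∀ (lines : List String) (election_name : String) (election_ids : List (String × Int)), Dom_election_results lines election_name election_ids → Pre_election_results lines election_name election_ids → Spec_election_results lines election_name election_ids (election_results lines election_name election_ids)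

-- ===== LEMMAS AND PROOFS =====
theorem pvWitness_ok :
    Dom_election_results pvWitness_election_results.1 pvWitness_election_results.2.1 pvWitness_election_results.2.2 ∧
    Pre_election_results pvWitness_election_results.1 pvWitness_election_results.2.1 pvWitness_election_results.2.2 := by
  decide

@[simp] theorem pvPairs_nil : pvPairs [] = [] := rfl
@[simp] theorem pvPairs_single (a : String) : pvPairs [a] = [] := rfl
@[simp] theorem pvPairs_cons_cons (a b : String) (l : List String) :
    pvPairs (a :: b :: l) = (a, b) :: pvPairs l := rfl

-- the two ignore containers (A's list with duplicates, B's set) have the same members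
theorem mem_ignore_iff (s : String) : s ∈ pvIgnoreA ↔ s ∈ pvIgnoreB := by
  have h : pvIgnoreB = ["Party", "Total", "REP", "DEM", "Write In Candidate", "Write In"] := by decide
  rw [h]
  simp [pvIgnoreA, List.mem_cons]
  tauto

-- the second member of every positional pair sits at an odd index of the buffer
theorem pvPairs_snd_odd :
    ∀ (l : List String) (k : Nat) (p : String × String), p ∈ pvPairs l →
      ∃ n, n % 2 ≠ k % 2 ∧ (p.2, n) ∈ l.zipIdx k := by
  intro l
  induction l using pvPairs.induct with
  | case1 a b rest ih =>
    intro k p hp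
    rw [pvPairs_cons_cons] at hp
    cases List.mem_cons.mp hp with
    | inl h =>
      exact ⟨k + 1, by omega, by rw [h]; simp [List.zipIdx_cons]⟩
    | inr h =>
      obtain ⟨n, hn, hmem⟩ := ih (k + 2) p h
      exact ⟨n, by omega, by simp [List.zipIdx_cons, hmem]⟩
  | case2 l h =>
    intro k p hp
    cases l with
    | nil => simp at hp
    | cons a rest =>
      cases rest with
      | nil => simp at hp
      | cons b r => exact absurd rfl (h a b r)

-- buffer accumulator peels off
theorem pvCollectB_acc (lines : List String) :
    ∀ (fuel : Nat) (i : Int) (buf : List String),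
      pvCollectB lines fuel i buf = buf ++ pvCollectB lines fuel i [] := by
  intro fuel
  induction fuel with
  | zero => intro i buf; simp [pvCollectB]
  | succ f ih =>
    intro i buf
    simp only [pvCollectB]
    cases hg : PySem.List.pyGet? lines i with
    | none => simp
    | some s =>
      by_cases hc : s = "Candidate"
      · simp [hc]
      · by_cases hi : s ∈ pvIgnoreB
        · simp [hc, hi, ih (i + 1) buf]
        · simp only [hc, hi, if_false, List.nil_append]
          rw [ih (i + 1) (buf ++ [s]), ih (i + 1) [s], List.append_assoc]

-- master lemma: A's toggle loop computes exactly B's pairing of the buffer, as long as every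
-- vote string in the pairing parses (Pre_ supplies that)
theorem pvLoopA_eq_pairs (lines : List String) :
    ∀ (fuel : Nat) (i : Int) (name : Option String) (names : List String) (results : List Int),
      (∀ p ∈ pvPairs (name.toList ++ pvCollectB lines fuel i []), (pvParse? p.2).isSome) →
      pvLoopA lines fuel i name names results =
        (names ++ (pvPairs (name.toList ++ pvCollectB lines fuel i [])).map (fun p => p.1),
         results ++ (pvPairs (name.toList ++ pvCollectB lines fuel i [])).map (fun p => (pvParse? p.2).getD 0)) := by
  intro fuel
  induction fuel with
  | zero =>
    intro i name names results _
    cases name <;> simp [pvLoopA, pvCollectB]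
  | succ f ih =>
    intro i name names results hp
    cases hg : PySem.List.pyGet? lines i with
    | none =>
      have hcol : pvCollectB lines (f + 1) i [] = [] := by simp [pvCollectB, hg]
      rw [hcol] at hp ⊢
      cases name <;> simp [pvLoopA, hg]
    | some s =>
      by_cases hc : s = "Candidate"
      · have hcol : pvCollectB lines (f + 1) i [] = [] := by simp [pvCollectB, hg, hc]
        rw [hcol] at hp ⊢
        cases name <;> simp [pvLoopA, hg, hc]
      · by_cases hi : s ∈ pvIgnoreA
        · have hi' : s ∈ pvIgnoreB := (mem_ignore_iff s).mp hi
          have hcol : pvCollectB lines (f + 1) i [] = pvCollectB lines f (i + 1) [] := by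
            simp [pvCollectB, hg, hc, hi']
          rw [hcol] at hp ⊢
          rw [show pvLoopA lines (f + 1) i name names results
              = pvLoopA lines f (i + 1) name names results from by
            simp [pvLoopA, hg, hc, hi]]
          exact ih (i + 1) name names results hp
        · have hi' : s ∉ pvIgnoreB := fun h => hi ((mem_ignore_iff s).mpr h)
          have hcol : pvCollectB lines (f + 1) i [] = s :: pvCollectB lines f (i + 1) [] := by
            rw [show pvCollectB lines (f + 1) i [] = pvCollectB lines f (i + 1) [s] from by
              simp [pvCollectB, hg, hc, hi']]
            rw [pvCollectB_acc lines f (i + 1) [s]]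
            rfl
          rw [hcol] at hp ⊢
          cases name with
          | none =>
            rw [show pvLoopA lines (f + 1) i none names results
                = pvLoopA lines f (i + 1) (some s) names results from by
              simp [pvLoopA, hg, hc, hi]]
            have := ih (i + 1) (some s) names results (by simpa using hp)
            simpa using this
          | some n =>
            have hs : (pvParse? s).isSome := hp (n, s) (by simp)
            obtain ⟨v, hv⟩ := Option.isSome_iff_exists.mp hs
            rw [show pvLoopA lines (f + 1) i (some n) names results
                = pvLoopA lines f (i + 1) none (names ++ [n]) (results ++ [v]) from by
              simp [pvLoopA, hg, hc, hi, hv]]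
            have := ih (i + 1) none (names ++ [n]) (results ++ [v])
              (by
                intro p hpm
                apply hp p
                simp only [Option.toList, List.nil_append] at hpm ⊢
                simp [hpm])
            rw [this]
            simp [hv]

-- under Pre_, the buffer is the segment between the start and the first sentinel, ignore-filtered
theorem pvCollectB_eq_seg (lines : List String) :
    ∀ (suffix : List String) (fuel : Nat) (i : Int),
      0 ≤ i → lines.drop i.toNat = suffix → suffix.length < fuel → "Candidate" ∈ suffix →
      pvCollectB lines fuel i [] =
        (suffix.takeWhile (fun s => s ≠ "Candidate")).filter (fun s => decide (s ∉ pvIgnoreB)) := by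
  intro suffix
  induction suffix with
  | nil => intro fuel i _ _ _ hm; simp at hm
  | cons a rest ih =>
    intro fuel i hi hdrop hfuel hm
    have hlt : i.toNat < lines.length := by
      by_contra h
      rw [List.drop_eq_nil_of_le (by omega)] at hdrop
      exact List.cons_ne_nil a rest hdrop.symm
    have hga : PySem.List.pyGet? lines i = some a := by
      rw [PySem.List.pyGet?_of_nonneg lines hi]
      rw [← List.head?_drop, hdrop]
      rfl
    cases fuel with
    | zero => omega
    | succ f =>
      simp only [pvCollectB, hga]
      by_cases hc : a = "Candidate"
      · simp [hc]
      · have hrest : lines.drop (i + 1).toNat = rest := by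
          have h1 : (i + 1).toNat = i.toNat + 1 := by omega
          rw [h1, ← List.tail_drop, hdrop, List.tail_cons]
        have hm' : "Candidate" ∈ rest := by
          cases List.mem_cons.mp hm with
          | inl h => exact absurd h.symm hc
          | inr h => exact h
        have hrec := ih f (i + 1) (by omega) hrest (by simp at hfuel; omega) hm'
        by_cases hign : a ∈ pvIgnoreB
        · simp only [hc, hign, ite_false, if_pos]
          rw [hrec]
          simp [hc, hign]
        · simp only [hc, hign, ite_false, List.nil_append]
          rw [pvCollectB_acc lines f (i + 1) [a], hrec]
          simp [hc, hign]

-- ===== VERDICT (by name: the statement is the Claim_ definition above) =====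
theorem election_results_spec : Claim_equal_election_results := by
  intro lines election_name election_ids _ hpre
  unfold Spec_election_results
  unfold Pre_election_results at hpre
  unfold election_results election_results_alt
  cases hget : PySem.Dict.get? (PySem.Dict.ofList election_ids) election_name with
  | none => rw [hget] at hpre
  | some id =>
    rw [hget] at hpre
    simp only [Bool.and_eq_true, Bool.or_eq_true, decide_eq_true_eq, List.all_eq_true] at hpre
    obtain ⟨⟨hst, hmem⟩, hodd⟩ := hpre
    have hparse : ∀ p ∈ pvPairs (((lines.drop (id + 1).toNat).takeWhile
          (fun s => s ≠ "Candidate")).filter (fun s => decide (s ∉ pvIgnoreB))),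
        (pvParse? p.2).isSome := by
      intro p hp
      obtain ⟨n, hn, hmem'⟩ := pvPairs_snd_odd _ 0 p hp
      cases hodd (p.2, n) hmem' with
      | inl h => omega
      | inr h => exact h
    have hdroplen : (lines.drop (id + 1).toNat).length < 2 * lines.length + 2 := by
      simp only [List.length_drop]
      omega
    have hbuf := pvCollectB_eq_seg lines (lines.drop (id + 1).toNat) (2 * lines.length + 2)
      (id + 1) hst rfl hdroplen hmem
    have hloop := pvLoopA_eq_pairs lines (2 * lines.length + 2) (id + 1) none [] []
      (by
        intro p hpm
        simp only [Option.toList, List.nil_append] at hpm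
        rw [hbuf] at hpm
        exact hparse p hpm)
    simp only [Option.toList, List.nil_append] at hloop
    show pvLoopA lines (2 * lines.length + 2) (id + 1) none [] []
        = (let pairs := pvPairs (pvCollectB lines (2 * lines.length + 2) (id + 1) []);
           (pairs.map (fun p => p.1), pairs.map (fun p => (pvParse? p.2).getD 0)))
    simp only [hbuf, hloop]
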